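-- pv_equiv track=rewrite | github.com/graham218/Leet-code.2025---Bill.Graham.Peacemaker- | Python/16-AdvancedTopics/3-SuffixArrays-&-Z-Algorithm/SuffixArrays-&-Z-Algorithm.py | search_pattern_suffix_array
-- ===== SOURCE A (Python) =====
-- def search_pattern_suffix_array(text, pattern, suffix_array):
--     """
--     Searches for a pattern in a text using the suffix array.
--
--     Args:
--         text: The input string.
--         pattern: The pattern to search for.
--         suffix_array: The suffix array of the text.
--
--     Returns:
--         A list of starting indices where the pattern occurs in the text.
--         Returns an empty list if the pattern is not found or input is invalid.
--     """
--     if not text or not pattern or not suffix_array: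
--         return []
--
--     n = len(text)
--     m = len(pattern)
--     left = 0
--     right = n - 1
--     occurrences = []
--
--     while left <= right:
--         mid = (left + right) // 2
--         suffix_start = suffix_array[mid]
--         comparison = text[suffix_start:min(suffix_start + m, n)].compareTo(pattern) if hasattr(text[suffix_start:min(suffix_start + m, n)], 'compareTo') else (text[suffix_start:min(suffix_start + m, n)] > pattern) - (text[suffix_start:min(suffix_start + m, n)] < pattern)
--
--         if comparison < 0:
--             left = mid + 1
--         elif comparison > 0:
--             right = mid - 1
--         else:  # Found a match
--             index = mid
--             # Find all occurrences to the left
--             while index >= 0 and text[suffix_array[index]:min(suffix_array[index] + m, n)] == pattern: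
--                 occurrences.append(suffix_array[index])
--                 index -= 1
--             index = mid + 1
--             # Find all occurrences to the right
--             while index < n and text[suffix_array[index]:min(suffix_array[index] + m, n)] == pattern:
--                 occurrences.append(suffix_array[index])
--                 index += 1
--             occurrences.sort()
--             return occurrences
--
--     return occurrences
-- ===== SOURCE B (Python) =====
-- def search_pattern_suffix_array(text, pattern, suffix_array):
--     if not text or not pattern or not suffix_array:
--         return []
--     m = len(pattern)
--     return sorted(s for s in suffix_array if text[s:s + m] == pattern)
-- ===== Notes on version B (the rewrite author's own statement) =====
-- stated objective: simpler
-- what changed: Replaced the binary search plus bidirectional expansion over the suffix array by a single linear filter: collect every suffix start whose length-m slice equals the pattern and sort the result; on a genuine (prefix-sorted, length-n) suffix array the matches form exactly the contiguous block A's search finds.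
-- outside the precondition, e.g. on search_pattern_suffix_array('ab', 'a', [1, 0]): A returns [], B returns [0]; on search_pattern_suffix_array('abc', 'b', [1, 2, 1, 1]): A returns [1], B returns [1, 1, 1]
import Mathlib
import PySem

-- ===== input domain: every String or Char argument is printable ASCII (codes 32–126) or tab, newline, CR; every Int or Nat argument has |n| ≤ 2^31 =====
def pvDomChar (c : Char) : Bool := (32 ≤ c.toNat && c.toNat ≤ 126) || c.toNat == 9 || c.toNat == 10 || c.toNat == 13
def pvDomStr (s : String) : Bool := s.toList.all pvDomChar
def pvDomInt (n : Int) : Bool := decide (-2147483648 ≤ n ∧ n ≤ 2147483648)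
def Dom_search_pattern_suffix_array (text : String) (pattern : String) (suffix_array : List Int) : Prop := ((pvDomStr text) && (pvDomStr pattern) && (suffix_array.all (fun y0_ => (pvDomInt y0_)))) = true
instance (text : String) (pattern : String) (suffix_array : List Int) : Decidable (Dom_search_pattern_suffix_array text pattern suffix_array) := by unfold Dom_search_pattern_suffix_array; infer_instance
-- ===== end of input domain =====

-- B replaces A's binary search + bidirectional expansion by a single linear filter over the
-- suffix array (collect matching suffix starts, then sort) — a simpler algorithm, not faster.

-- ===== PORT A =====
-- text[start:min(start+m,n)], A's truncated prefix of the suffix beginning at start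
def pvPfxA (t : List Char) (n m start : Int) : List Char :=
  PySem.List.slice t (some start) (some (min (start + m) n))

-- while index >= 0 and text[sa[index]:…] == pattern: occurrences.append(sa[index]); index -= 1
def pvExpandLeft (t p : List Char) (sa : List Int) (n m : Int) (index : Int) (occ : List Int) : List Int :=
  if h : 0 ≤ index then
    let s := PySem.List.pyGetD sa index 0   -- sa[index]; in range under Pre_
    if pvPfxA t n m s = p then
      pvExpandLeft t p sa n m (index - 1) (occ ++ [s])
    else occ
  else occ
termination_by (index + 1).toNat
decreasing_by omega

-- while index < n and text[sa[index]:…] == pattern: occurrences.append(sa[index]); index += 1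
def pvExpandRight (t p : List Char) (sa : List Int) (n m : Int) (index : Int) (occ : List Int) : List Int :=
  if h : index < n then
    let s := PySem.List.pyGetD sa index 0   -- sa[index]; in range under Pre_
    if pvPfxA t n m s = p then
      pvExpandRight t p sa n m (index + 1) (occ ++ [s])
    else occ
  else occ
termination_by (n - index).toNat
decreasing_by omega

-- the while left <= right binary-search loop of A
def pvALoop (t p : List Char) (sa : List Int) (n m : Int) (left right : Int) (occ : List Int) : List Int :=
  if h : left ≤ right then
    let mid := PySem.Int.floordiv (left + right) 2
    let s := PySem.List.pyGetD sa mid 0     -- sa[mid]; in range under Pre_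
    let pref := pvPfxA t n m s
    if pref < p then pvALoop t p sa n m (mid + 1) right occ          -- comparison < 0
    else if p < pref then pvALoop t p sa n m left (mid - 1) occ      -- comparison > 0
    else
      let occ₁ := pvExpandLeft t p sa n m mid occ
      let occ₂ := pvExpandRight t p sa n m (mid + 1) occ₁
      PySem.List.sorted occ₂ (fun x => x)                            -- occurrences.sort(); return
  else occ
termination_by (right + 1 - left).toNat
decreasing_by
  · have := PySem.Int.floordiv_two_mid_bounds h; omega
  · have := PySem.Int.floordiv_two_mid_bounds h; omega

def search_pattern_suffix_array (text : String) (pattern : String) (suffix_array : List Int) : List Int :=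
  if text.toList = [] ∨ pattern.toList = [] ∨ suffix_array = [] then []
  else
    let n : Int := text.toList.length
    let m : Int := pattern.toList.length
    pvALoop text.toList pattern.toList suffix_array n m 0 (n - 1) []

-- ===== PORT B =====
-- text[s:s+m] == pattern, B's match test for the suffix beginning at s
def pvMatchB (t p : List Char) (s : Int) : Bool :=
  PySem.List.slice t (some s) (some (s + (p.length : Int))) = p

def search_pattern_suffix_array_alt (text : String) (pattern : String) (suffix_array : List Int) : List Int :=
  if text.toList = [] ∨ pattern.toList = [] ∨ suffix_array = [] then []
  else
    PySem.List.sorted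
      (suffix_array.filter (fun s => pvMatchB text.toList pattern.toList s))
      (fun x => x)

-- ===== PRECONDITION & SPEC =====
-- Pre_ admits the trivially-guarded inputs, inputs whose pattern occurs nowhere in the text (with
-- suffix_array long enough for A's search not to index past its end), and the function's natural
-- domain — suffix_array with one entry per character of text listing the (length-m truncated)
-- suffix prefixes in nondecreasing order.  It excludes arrays shorter than the text, on which A's
-- binary search raises IndexError, and unsorted or wrongly-sized arrays containing a match, where
-- A's result is an accident of the search path.
def Pre_search_pattern_suffix_array (text : String) (pattern : String) (suffix_array : List Int) : Prop :=
  text.toList = [] ∨ pattern.toList = [] ∨ suffix_array = [] ∨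
  (¬ pattern.toList <:+: text.toList ∧ text.toList.length ≤ suffix_array.length) ∨
  (suffix_array.length = text.toList.length ∧
   (suffix_array.map (fun s =>
      PySem.List.slice text.toList (some s) (some (s + (pattern.toList.length : Int))))).Pairwise (· ≤ ·))
instance (text : String) (pattern : String) (suffix_array : List Int) : Decidable (Pre_search_pattern_suffix_array text pattern suffix_array) := by unfold Pre_search_pattern_suffix_array; infer_instance

def pvWitness_search_pattern_suffix_array : String × String × List Int := ("banana", "ana", [5, 3, 1, 0, 4, 2])

def Spec_search_pattern_suffix_array (text : String) (pattern : String) (suffix_array : List Int) (out : List Int) : Prop := out = search_pattern_suffix_array_alt text pattern suffix_array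
instance (text : String) (pattern : String) (suffix_array : List Int) (out : List Int) : Decidable (Spec_search_pattern_suffix_array text pattern suffix_array out) := by unfold Spec_search_pattern_suffix_array; infer_instance

-- ===== CLAIM (what is proved, stated in full; the proofs are below) =====
def Claim_equal_search_pattern_suffix_array : Prop := ∀ (text : String) (pattern : String) (suffix_array : List Int), Dom_search_pattern_suffix_array text pattern suffix_array → Pre_search_pattern_suffix_array text pattern suffix_array → Spec_search_pattern_suffix_array text pattern suffix_array (search_pattern_suffix_array text pattern suffix_array)

-- ===== LEMMAS AND PROOFS =====

-- A's truncated slice equals B's plain slice: a stop bound past the end clamps anyway.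
lemma pvClampIdx_min (n : Nat) (b : Int) :
    PySem.List.clampIdx n (min b (n : Int)) = PySem.List.clampIdx n b := by
  unfold PySem.List.clampIdx
  rcases le_total b (n : Int) with h | h
  · rw [min_eq_left h]
  · rw [min_eq_right h]; split_ifs <;> omega

-- A's truncated slice equals B's plain slice: a stop bound past the end clamps anyway.
lemma pvPfxA_eq_matchSlice (t : List Char) (m s : Int) :
    pvPfxA t (t.length : Int) m s = PySem.List.slice t (some s) (some (s + m)) := by
  unfold pvPfxA
  simp only [PySem.List.slice, pvClampIdx_min]

lemma pvMap_getD_range (sa : List Int) :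
    List.map (fun i => sa.getD i 0) (List.range sa.length) = sa := by
  apply List.ext_getElem
  · simp
  · intro i h₁ h₂; simp [List.getElem?_eq_getElem h₂]


-- B's prefix of the suffix starting at s (the value pvMatchB compares with the pattern)
def pvF (t p : List Char) (s : Int) : List Char :=
  PySem.List.slice t (some s) (some (s + (p.length : Int)))

-- descending block collected by A's left expansion: matches at positions ≤ index
def pvDown (t p : List Char) (sa : List Int) (index : Int) : List Int :=
  (((List.range sa.length).filter
      (fun (i : Nat) => decide ((i : Int) ≤ index) && pvMatchB t p (sa.getD i 0))).map
    (fun i => sa.getD i 0)).reverse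

-- ascending block collected by A's right expansion: matches at positions ≥ index
def pvUp (t p : List Char) (sa : List Int) (index : Int) : List Int :=
  ((List.range sa.length).filter
      (fun (i : Nat) => decide (index ≤ (i : Int)) && pvMatchB t p (sa.getD i 0))).map
    (fun i => sa.getD i 0)

lemma pvFilter_le_split (len j : Nat) (Q : Nat → Bool) (hj : j < len) (hQ : Q j = true) :
    (List.range len).filter (fun i => decide (i ≤ j) && Q i)
      = (List.range len).filter (fun i => decide (i < j) && Q i) ++ [j] := by
  induction len with
  | zero => omega
  | succ l ih =>
    rw [List.range_succ, List.filter_append, List.filter_append]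
    rcases Nat.lt_or_ge j l with h | h
    · rw [ih h]
      simp [show ¬ (l ≤ j) by omega, show ¬ (l < j) by omega]
    · have hjl : j = l := by omega
      subst hjl
      have h1 : (List.range j).filter (fun i => decide (i ≤ j) && Q i)
          = (List.range j).filter (fun i => decide (i < j) && Q i) := by
        apply List.filter_congr
        intro a ha
        have : a < j := List.mem_range.mp ha
        simp [Nat.le_of_lt this, this]
      rw [h1]
      simp [hQ]

lemma pvFilter_ge_split (len j : Nat) (Q : Nat → Bool) (hj : j < len) (hQ : Q j = true) :
    (List.range len).filter (fun i => decide (j ≤ i) && Q i)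
      = j :: (List.range len).filter (fun i => decide (j < i) && Q i) := by
  induction len with
  | zero => omega
  | succ l ih =>
    rw [List.range_succ, List.filter_append, List.filter_append]
    rcases Nat.lt_or_ge j l with h | h
    · rw [ih h]
      have h1 : decide (j ≤ l) = true := by simp [Nat.le_of_lt h]
      have h2 : decide (j < l) = true := by simp [h]
      simp [List.filter_singleton, h1, h2]
    · have hjl : j = l := by omega
      subst hjl
      have h2 : (List.range j).filter (fun i => decide (j ≤ i) && Q i) = [] := by
        apply List.filter_eq_nil_iff.mpr
        intro a ha
        have : a < j := List.mem_range.mp ha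
        simp; omega
      have h3 : (List.range j).filter (fun i => decide (j < i) && Q i) = [] := by
        apply List.filter_eq_nil_iff.mpr
        intro a ha
        have : a < j := List.mem_range.mp ha
        simp; omega
      rw [h2, h3]
      simp [hQ]

lemma pvDown_nil (t p : List Char) (sa : List Int) (index : Int)
    (h : ∀ i : Nat, (i : Int) ≤ index → i < sa.length → pvMatchB t p (sa.getD i 0) = false) :
    pvDown t p sa index = [] := by
  unfold pvDown
  have : (List.range sa.length).filter
      (fun (i : Nat) => decide ((i : Int) ≤ index) && pvMatchB t p (sa.getD i 0)) = [] := by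
    apply List.filter_eq_nil_iff.mpr
    intro a ha
    have ha' : a < sa.length := List.mem_range.mp ha
    by_cases hc : (a : Int) ≤ index
    · simp only [Bool.and_eq_true, decide_eq_true_eq, not_and]
      intro _
      simpa [List.getD_eq_getElem?_getD] using h a hc ha'
    · simp [hc]
  rw [this]; rfl

lemma pvUp_nil (t p : List Char) (sa : List Int) (index : Int)
    (h : ∀ i : Nat, index ≤ (i : Int) → i < sa.length → pvMatchB t p (sa.getD i 0) = false) :
    pvUp t p sa index = [] := by
  unfold pvUp
  have : (List.range sa.length).filter
      (fun (i : Nat) => decide (index ≤ (i : Int)) && pvMatchB t p (sa.getD i 0)) = [] := by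
    apply List.filter_eq_nil_iff.mpr
    intro a ha
    have ha' : a < sa.length := List.mem_range.mp ha
    by_cases hc : index ≤ (a : Int)
    · simp only [Bool.and_eq_true, decide_eq_true_eq, not_and]
      intro _
      simpa [List.getD_eq_getElem?_getD] using h a hc ha'
    · simp [hc]
  rw [this]; rfl

lemma pvDown_cons (t p : List Char) (sa : List Int) (index : Int)
    (h0 : 0 ≤ index) (hlt : index < (sa.length : Int))
    (hM : pvMatchB t p (sa.getD index.toNat 0) = true) :
    pvDown t p sa index = sa.getD index.toNat 0 :: pvDown t p sa (index - 1) := by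
  unfold pvDown
  have e1 : (List.range sa.length).filter
        (fun (i : Nat) => decide ((i : Int) ≤ index) && pvMatchB t p (sa.getD i 0))
      = (List.range sa.length).filter
        (fun i => decide (i ≤ index.toNat) && pvMatchB t p (sa.getD i 0)) := by
    apply List.filter_congr; intro a _
    have : ((a : Int) ≤ index) ↔ (a ≤ index.toNat) := by omega
    rw [decide_eq_decide.mpr this]
  have e2 : (List.range sa.length).filter
        (fun i => decide (i < index.toNat) && pvMatchB t p (sa.getD i 0))
      = (List.range sa.length).filter
        (fun (i : Nat) => decide ((i : Int) ≤ index - 1) && pvMatchB t p (sa.getD i 0)) := by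
    apply List.filter_congr; intro a _
    have : (a < index.toNat) ↔ ((a : Int) ≤ index - 1) := by omega
    rw [decide_eq_decide.mpr this]
  rw [e1, pvFilter_le_split sa.length index.toNat _ (by omega) hM, ← e2]
  simp

lemma pvUp_cons (t p : List Char) (sa : List Int) (index : Int)
    (h0 : 0 ≤ index) (hlt : index < (sa.length : Int))
    (hM : pvMatchB t p (sa.getD index.toNat 0) = true) :
    pvUp t p sa index = sa.getD index.toNat 0 :: pvUp t p sa (index + 1) := by
  unfold pvUp
  have e1 : (List.range sa.length).filter
        (fun (i : Nat) => decide (index ≤ (i : Int)) && pvMatchB t p (sa.getD i 0))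
      = (List.range sa.length).filter
        (fun i => decide (index.toNat ≤ i) && pvMatchB t p (sa.getD i 0)) := by
    apply List.filter_congr; intro a _
    have : (index ≤ (a : Int)) ↔ (index.toNat ≤ a) := by omega
    rw [decide_eq_decide.mpr this]
  have e2 : (List.range sa.length).filter
        (fun i => decide (index.toNat < i) && pvMatchB t p (sa.getD i 0))
      = (List.range sa.length).filter
        (fun (i : Nat) => decide (index + 1 ≤ (i : Int)) && pvMatchB t p (sa.getD i 0)) := by
    apply List.filter_congr; intro a _
    have : (index.toNat < a) ↔ (index + 1 ≤ (a : Int)) := by omega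
    rw [decide_eq_decide.mpr this]
  rw [e1, pvFilter_ge_split sa.length index.toNat _ (by omega) hM, ← e2]
  simp

-- pointwise monotonicity of the truncated prefixes, from Pre_'s Pairwise
lemma pvMono (t p : List Char) (sa : List Int)
    (hs : (sa.map (fun s => PySem.List.slice t (some s) (some (s + (p.length : Int))))).Pairwise (· ≤ ·)) :
    ∀ i j : Nat, i ≤ j → j < sa.length → pvF t p (sa.getD i 0) ≤ pvF t p (sa.getD j 0) := by
  intro i j hij hj
  rcases Nat.eq_or_lt_of_le hij with rfl | hlt
  · exact le_refl _
  · have hi : i < sa.length := Nat.lt_trans hlt hj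
    have := (List.pairwise_iff_getElem.mp hs) i j (by simpa) (by simpa) hlt
    simpa [pvF, List.getD_eq_getElem, hi, hj] using this


-- A's left expansion collects exactly the matches at positions ≤ index (sortedness kills anything below a mismatch)
lemma pvEL (t p : List Char) (sa : List Int) (hn : sa.length = t.length)
    (hmono : ∀ i j : Nat, i ≤ j → j < sa.length → pvF t p (sa.getD i 0) ≤ pvF t p (sa.getD j 0))
    (mid : Int) (hmid0 : 0 ≤ mid) (hmidn : mid < (sa.length : Int))
    (hm : pvF t p (sa.getD mid.toNat 0) = p) :
    ∀ (k : Nat) (index : Int), (index + 1).toNat = k → index ≤ mid →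
      ∀ occ, pvExpandLeft t p sa (t.length : Int) (p.length : Int) index occ
        = occ ++ pvDown t p sa index := by
  intro k
  induction k with
  | zero =>
    intro index hk hle occ
    rw [pvExpandLeft, dif_neg (by omega)]
    rw [pvDown_nil t p sa index (by intro i hi _; omega)]
    simp
  | succ k ih =>
    intro index hk hle occ
    have h0 : 0 ≤ index := by omega
    have hltn : index < (sa.length : Int) := by omega
    rw [pvExpandLeft, dif_pos h0]
    have hget : PySem.List.pyGetD sa index 0 = sa.getD index.toNat 0 := by
      rw [PySem.List.pyGetD_eq_getElem sa 0 h0 hltn, List.getD_eq_getElem sa 0 (by omega)]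
    rw [hget]
    simp only [pvPfxA_eq_matchSlice]
    by_cases hM : PySem.List.slice t (some (sa.getD index.toNat 0))
        (some (sa.getD index.toNat 0 + (p.length : Int))) = p
    · rw [if_pos hM]
      rw [ih (index - 1) (by omega) (by omega) (occ ++ [sa.getD index.toNat 0])]
      rw [pvDown_cons t p sa index h0 hltn (by simpa [pvMatchB, List.getD_eq_getElem?_getD] using hM)]
      simp
    · rw [if_neg hM]
      have hkill : ∀ i : Nat, (i : Int) ≤ index → i < sa.length →
          pvMatchB t p (sa.getD i 0) = false := by
        intro i hi hilen
        have hidx : pvF t p (sa.getD index.toNat 0) < p := by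
          have h1 : pvF t p (sa.getD index.toNat 0) ≤ pvF t p (sa.getD mid.toNat 0) :=
            hmono index.toNat mid.toNat (by omega) (by omega)
          rw [hm] at h1
          exact lt_of_le_of_ne h1 (by simpa [pvF] using hM)
        have h2 : pvF t p (sa.getD i 0) ≤ pvF t p (sa.getD index.toNat 0) :=
          hmono i index.toNat (by omega) (by omega)
        have : pvF t p (sa.getD i 0) ≠ p := ne_of_lt (lt_of_le_of_lt h2 hidx)
        simpa [pvMatchB, pvF] using this
      rw [pvDown_nil t p sa index hkill]
      simp

-- A's right expansion collects exactly the matches at positions ≥ index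
lemma pvER (t p : List Char) (sa : List Int) (hn : sa.length = t.length)
    (hmono : ∀ i j : Nat, i ≤ j → j < sa.length → pvF t p (sa.getD i 0) ≤ pvF t p (sa.getD j 0))
    (mid : Int) (hmid0 : 0 ≤ mid) (hmidn : mid < (sa.length : Int))
    (hm : pvF t p (sa.getD mid.toNat 0) = p) :
    ∀ (k : Nat) (index : Int), ((sa.length : Int) - index).toNat = k → mid ≤ index →
      ∀ occ, pvExpandRight t p sa (t.length : Int) (p.length : Int) index occ
        = occ ++ pvUp t p sa index := by
  intro k
  induction k with
  | zero =>
    intro index hk hge occ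
    rw [pvExpandRight, dif_neg (by omega)]
    rw [pvUp_nil t p sa index (by intro i hi hilen; omega)]
    simp
  | succ k ih =>
    intro index hk hge occ
    have h0 : 0 ≤ index := by omega
    have hltn : index < (sa.length : Int) := by omega
    rw [pvExpandRight, dif_pos (by omega : index < (t.length : Int))]
    have hget : PySem.List.pyGetD sa index 0 = sa.getD index.toNat 0 := by
      rw [PySem.List.pyGetD_eq_getElem sa 0 h0 hltn, List.getD_eq_getElem sa 0 (by omega)]
    rw [hget]
    simp only [pvPfxA_eq_matchSlice]
    by_cases hM : PySem.List.slice t (some (sa.getD index.toNat 0))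
        (some (sa.getD index.toNat 0 + (p.length : Int))) = p
    · rw [if_pos hM]
      rw [ih (index + 1) (by omega) (by omega) (occ ++ [sa.getD index.toNat 0])]
      rw [pvUp_cons t p sa index h0 hltn (by simpa [pvMatchB, List.getD_eq_getElem?_getD] using hM)]
      simp
    · rw [if_neg hM]
      have hkill : ∀ i : Nat, index ≤ (i : Int) → i < sa.length →
          pvMatchB t p (sa.getD i 0) = false := by
        intro i hi hilen
        have hidx : p < pvF t p (sa.getD index.toNat 0) := by
          have h1 : pvF t p (sa.getD mid.toNat 0) ≤ pvF t p (sa.getD index.toNat 0) :=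
            hmono mid.toNat index.toNat (by omega) (by omega)
          rw [hm] at h1
          exact lt_of_le_of_ne h1 (by simpa [pvF] using (fun h => hM h.symm))
        have h2 : pvF t p (sa.getD index.toNat 0) ≤ pvF t p (sa.getD i 0) :=
          hmono index.toNat i (by omega) hilen
        have : pvF t p (sa.getD i 0) ≠ p := ne_of_gt (lt_of_lt_of_le hidx h2)
        simpa [pvMatchB, pvF] using this
      rw [pvUp_nil t p sa index hkill]
      simp

-- the two expansion blocks together are a rearrangement of B's filter
lemma pvBlock_perm (t p : List Char) (sa : List Int) (mid : Int) :
    (pvDown t p sa mid ++ pvUp t p sa (mid + 1)).Perm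
      (sa.filter (fun s => pvMatchB t p s)) := by
  unfold pvDown pvUp
  refine ((List.reverse_perm _).append_right _).trans ?_
  rw [← List.map_append]
  have hsa : sa.filter (fun s => pvMatchB t p s)
      = ((List.range sa.length).filter (fun (i : Nat) => pvMatchB t p (sa.getD i 0))).map
          (fun i => sa.getD i 0) := by
    conv_lhs => rw [← pvMap_getD_range sa]
    rw [List.filter_map]
    rfl
  rw [hsa]
  apply List.Perm.map
  have hperm := List.filter_append_perm (fun (i : Nat) => decide ((i : Int) ≤ mid))
    ((List.range sa.length).filter (fun (i : Nat) => pvMatchB t p (sa.getD i 0)))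
  rw [List.filter_filter, List.filter_filter] at hperm
  refine List.Perm.trans ?_ hperm
  apply List.Perm.append
  · apply List.Perm.of_eq
    apply List.filter_congr
    intro a _
    rw [Bool.and_comm]
  · apply List.Perm.of_eq
    apply List.filter_congr
    intro a _
    rw [Bool.and_comm]
    by_cases hc : (a : Int) ≤ mid
    · simp [hc, show ¬ mid < (a : Int) by omega]
    · simp [hc, show mid < (a : Int) by omega]


-- A's binary-search loop, under the invariant that everything left of `left` compares below the
-- pattern and everything right of `right` above it, returns exactly B's sorted filter
lemma pvALoop_eq (t p : List Char) (sa : List Int) (hn : sa.length = t.length)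
    (hmono : ∀ i j : Nat, i ≤ j → j < sa.length → pvF t p (sa.getD i 0) ≤ pvF t p (sa.getD j 0)) :
    ∀ (k : Nat) (left right : Int), (right + 1 - left).toNat = k →
      0 ≤ left → right < (sa.length : Int) →
      (∀ i : Nat, i < sa.length → (i : Int) < left → pvF t p (sa.getD i 0) < p) →
      (∀ i : Nat, i < sa.length → right < (i : Int) → p < pvF t p (sa.getD i 0)) →
      pvALoop t p sa (t.length : Int) (p.length : Int) left right []
        = PySem.List.sorted (sa.filter (fun s => pvMatchB t p s)) (fun x => x) := by
  intro k
  induction k using Nat.strong_induction_on with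
  | _ k ih =>
    intro left right hk hl hr hL hR
    by_cases hlr : left ≤ right
    case neg =>
      rw [pvALoop, dif_neg hlr]
      have hfil : sa.filter (fun s => pvMatchB t p s) = [] := by
        apply List.filter_eq_nil_iff.mpr
        intro s hs
        obtain ⟨i, hi, hieq⟩ := List.mem_iff_getElem.mp hs
        have hgd : sa.getD i 0 = s := by rw [List.getD_eq_getElem sa 0 hi]; exact hieq
        have hne : pvF t p s ≠ p := by
          rw [← hgd]
          rcases lt_or_ge (i : Int) left with hc | hc
          · exact ne_of_lt (hL i hi hc)
          · exact ne_of_gt (hR i hi (by omega))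
        simpa [pvMatchB, pvF] using hne
      rw [hfil]
      rfl
    case pos =>
      rw [pvALoop, dif_pos hlr]
      obtain ⟨hm1, hm2⟩ := PySem.Int.floordiv_two_mid_bounds hlr
      have hget : PySem.List.pyGetD sa (PySem.Int.floordiv (left + right) 2) 0
          = sa.getD (PySem.Int.floordiv (left + right) 2).toNat 0 := by
        rw [PySem.List.pyGetD_eq_getElem sa 0 (by omega) (by omega),
          List.getD_eq_getElem sa 0 (by omega)]
      simp only [hget, pvPfxA_eq_matchSlice]
      set mid : Int := PySem.Int.floordiv (left + right) 2 with hmiddef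
      by_cases c1 : PySem.List.slice t (some (sa.getD mid.toNat 0))
          (some (sa.getD mid.toNat 0 + (p.length : Int))) < p
      · rw [if_pos c1]
        refine ih (right + 1 - (mid + 1)).toNat (by omega) (mid + 1) right (by omega)
          (by omega) hr ?_ hR
        intro i hi hilt
        exact lt_of_le_of_lt (hmono i mid.toNat (by omega) (by omega)) c1
      · rw [if_neg c1]
        by_cases c2 : p < PySem.List.slice t (some (sa.getD mid.toNat 0))
            (some (sa.getD mid.toNat 0 + (p.length : Int)))
        · rw [if_pos c2]
          refine ih (mid - 1 + 1 - left).toNat (by omega) left (mid - 1) (by omega)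
            hl (by omega) hL ?_
          intro i hi hgt
          exact lt_of_lt_of_le c2 (hmono mid.toNat i (by omega) hi)
        · rw [if_neg c2]
          have heq : pvF t p (sa.getD mid.toNat 0) = p :=
            le_antisymm (not_lt.mp c2) (not_lt.mp c1)
          rw [pvEL t p sa hn hmono mid (by omega) (by omega) heq _ mid rfl (le_refl mid) []]
          rw [pvER t p sa hn hmono mid (by omega) (by omega) heq _ (mid + 1) rfl (by omega) _]
          simp only [List.nil_append]
          exact PySem.List.sorted_eq_sorted_of_perm _ _ _ (fun a b h => h)
            (pvBlock_perm t p sa mid)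

-- every slice of the text is an infix of the text
lemma pvSlice_infix (t : List Char) (a b : Option Int) : PySem.List.slice t a b <:+: t := by
  unfold PySem.List.slice
  exact ((List.take_prefix _ _).isInfix).trans (List.drop_suffix _ _).isInfix

-- if no truncated prefix can equal the pattern, A's loop never enters the match branch
lemma pvALoop_nomatch (t p : List Char) (sa : List Int)
    (h : ∀ s : Int, PySem.List.slice t (some s) (some (s + (p.length : Int))) ≠ p) :
    ∀ (k : Nat) (left right : Int), (right + 1 - left).toNat = k → ∀ occ,
      pvALoop t p sa (t.length : Int) (p.length : Int) left right occ = occ := by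
  intro k
  induction k using Nat.strong_induction_on with
  | _ k ih =>
    intro left right hk occ
    by_cases hlr : left ≤ right
    · rw [pvALoop, dif_pos hlr]
      obtain ⟨hm1, hm2⟩ := PySem.Int.floordiv_two_mid_bounds hlr
      simp only [pvPfxA_eq_matchSlice]
      set mid : Int := PySem.Int.floordiv (left + right) 2 with hmiddef
      by_cases c1 : PySem.List.slice t (some (PySem.List.pyGetD sa mid 0))
          (some (PySem.List.pyGetD sa mid 0 + (p.length : Int))) < p
      · rw [if_pos c1]
        exact ih (right + 1 - (mid + 1)).toNat (by omega) (mid + 1) right rfl occ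
      · rw [if_neg c1]
        by_cases c2 : p < PySem.List.slice t (some (PySem.List.pyGetD sa mid 0))
            (some (PySem.List.pyGetD sa mid 0 + (p.length : Int)))
        · rw [if_pos c2]
          exact ih (mid - 1 + 1 - left).toNat (by omega) left (mid - 1) rfl occ
        · exact absurd (le_antisymm (not_lt.mp c2) (not_lt.mp c1))
            (h (PySem.List.pyGetD sa mid 0))
    · rw [pvALoop, dif_neg hlr]

theorem search_pattern_suffix_array_spec : Claim_equal_search_pattern_suffix_array := by
  intro text pattern sa _hdom hpre
  unfold Spec_search_pattern_suffix_array
  unfold search_pattern_suffix_array search_pattern_suffix_array_alt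
  by_cases hg : text.toList = [] ∨ pattern.toList = [] ∨ sa = []
  · rw [if_pos hg, if_pos hg]
  · rw [if_neg hg, if_neg hg]
    push Not at hg
    obtain ⟨ht, hp, hsa⟩ := hg
    rcases hpre with h | h | h | ⟨hni, _hlen⟩ | ⟨hlen, hsort⟩
    · exact absurd h ht
    · exact absurd h hp
    · exact absurd h hsa
    · have hns : ∀ s : Int, PySem.List.slice text.toList (some s)
          (some (s + (pattern.toList.length : Int))) ≠ pattern.toList := by
        intro s hcontra
        exact hni (hcontra ▸ pvSlice_infix text.toList (some s) (some (s + (pattern.toList.length : Int))))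
      rw [pvALoop_nomatch text.toList pattern.toList sa hns _ 0 ((text.toList.length : Int) - 1) rfl []]
      have hfil : sa.filter (fun s => pvMatchB text.toList pattern.toList s) = [] := by
        apply List.filter_eq_nil_iff.mpr
        intro s _
        simpa [pvMatchB] using hns s
      rw [hfil]
      rfl
    · have hmono := pvMono text.toList pattern.toList sa hsort
      refine pvALoop_eq text.toList pattern.toList sa hlen hmono _ 0
        ((text.toList.length : Int) - 1) rfl (le_refl 0) (by omega) ?_ ?_
      · intro i _ hilt; omega
      · intro i hi hgt
        exfalso
        omega
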